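-- pv_equiv track=rewrite | github.com/SamuelSchlesinger/erdos-problems | scripts/gadget_mine.py | families_overlap_connected
-- ===== SOURCE A (Python) =====
-- def families_overlap_connected(families):
--     """Return True if family-overlap graph is connected.
--
--     Vertices are family hyperedges; edges join families with nonempty intersection.
--     """
--     if len(families) <= 1:
--         return True
--     fam_sets = [set(f) for f in families]
--     stack = [0]
--     seen = {0}
--     while stack:
--         i = stack.pop()
--         for j in range(len(fam_sets)):
--             if j in seen:
--                 continue
--             if fam_sets[i] & fam_sets[j]:
--                 seen.add(j)
--                 stack.append(j)
--     return len(seen) == len(fam_sets)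
-- ===== SOURCE B (Python) =====
-- def families_overlap_connected(families):
--     """Return True if family-overlap graph is connected.
--
--     Inverted index element -> family indices; DFS walks buckets instead of
--     intersecting every pair of families.
--     """
--     n = len(families)
--     if n <= 1:
--         return True
--     elem_to_fams = {}
--     for i, fam in enumerate(families):
--         for e in fam:
--             elem_to_fams.setdefault(e, []).append(i)
--     visited = [False] * n
--     visited[0] = True
--     count = 1
--     stack = [0]
--     while stack:
--         i = stack.pop()
--         for e in families[i]:
--             for j in elem_to_fams[e]:
--                 if not visited[j]:
--                     visited[j] = True
--                     count += 1
--                     stack.append(j)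
--     return count == n
-- ===== Notes on version B (the rewrite author's own statement) =====
-- stated objective: alternative
-- what changed: Replaces the per-vertex scan over all families with pairwise set intersections by an element->family-indices inverted index built once, so the DFS follows buckets of families sharing an element instead of intersecting every pair of families.
import Mathlib
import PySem

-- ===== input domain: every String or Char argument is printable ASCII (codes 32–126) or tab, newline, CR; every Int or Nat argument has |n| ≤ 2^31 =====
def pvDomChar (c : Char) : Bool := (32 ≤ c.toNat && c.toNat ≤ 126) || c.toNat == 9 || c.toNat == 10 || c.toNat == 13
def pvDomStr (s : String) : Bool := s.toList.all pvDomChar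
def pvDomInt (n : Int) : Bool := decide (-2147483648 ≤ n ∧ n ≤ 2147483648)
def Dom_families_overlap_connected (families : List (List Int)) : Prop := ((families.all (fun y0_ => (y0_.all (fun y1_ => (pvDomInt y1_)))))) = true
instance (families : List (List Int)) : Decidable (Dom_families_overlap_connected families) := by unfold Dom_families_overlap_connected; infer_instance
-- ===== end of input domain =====

-- B replaces A's per-vertex scan over all families (with pairwise set intersections) by an
-- element -> family-indices inverted index built once; same return value, different algorithm.

-- ===== PORT A =====
-- inner 'for j in range(len(fam_sets)): ...' of A's while-loop; state = (stack, seen)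
def pvAInner (famSets : List (PySem.Set Int)) (i : Int) (js : List Int)
    (stack : List Int) (seen : PySem.Set Int) : List Int × PySem.Set Int :=
  js.foldl (fun st j =>
    if PySem.Set.contains st.2 j then st
    else if (PySem.Set.inter (PySem.List.pyGetD famSets i []) (PySem.List.pyGetD famSets j [])).isEmpty then st
    else (st.1 ++ [j], PySem.Set.add st.2 j)) (stack, seen)

-- A's 'while stack:' loop; the fuel 2*n+1 is a totality guard only: each iteration pops one
-- element and every push is paired with adding a new index to seen, so the loop runs at most
-- n times; the 'none' branch of pop? is exactly Python's loop exit on an empty stack.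
def pvALoop (famSets : List (PySem.Set Int)) : Nat → List Int → PySem.Set Int → PySem.Set Int
  | 0, _, seen => seen
  | fuel+1, stack, seen =>
    match PySem.List.pop? stack with
    | none => seen
    | some (i, rest) =>
      let st := pvAInner famSets i (PySem.List.pyRange 0 (famSets.length : Int) 1) rest seen
      pvALoop famSets fuel st.1 st.2

def families_overlap_connected (families : List (List Int)) : Bool :=
  if families.length ≤ 1 then true
  else
    let famSets := families.map (fun f => PySem.Set.ofList f)
    let seen := pvALoop famSets (2 * families.length + 1) [0] [0]
    PySem.Set.len seen == (famSets.length : Int)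

-- ===== PORT B =====
-- 'for i, fam in enumerate(families): for e in fam: elem_to_fams.setdefault(e, []).append(i)'
def pvIndex (families : List (List Int)) : PySem.Dict Int (List Int) :=
  (PySem.List.enumerate families 0).foldl
    (fun d p => p.2.foldl (fun d e => d.modify e [] (fun b => b ++ [p.1])) d)
    PySem.Dict.empty

-- body of B's while-loop for a popped index i; state = (visited, count, stack);
-- 'elem_to_fams[e]' is ported as getD with default [] — the key e ∈ families[i] is always present.
def pvBBody (families : List (List Int)) (idx : PySem.Dict Int (List Int)) (i : Int)
    (st : List Bool × Int × List Int) : List Bool × Int × List Int :=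
  (PySem.List.pyGetD families i []).foldl (fun st e =>
    (idx.getD e []).foldl (fun st j =>
      if PySem.List.pyGetD st.1 j false then st
      else (PySem.List.pySetD st.1 j true, st.2.1 + 1, st.2.2 ++ [j])) st) st

-- B's 'while stack:' loop; fuel 2*n+1 is a totality guard only (same bound as A's loop).
def pvBLoop (families : List (List Int)) (idx : PySem.Dict Int (List Int)) :
    Nat → List Bool × Int × List Int → List Bool × Int × List Int
  | 0, st => st
  | fuel+1, st =>
    match PySem.List.pop? st.2.2 with
    | none => st
    | some (i, rest) => pvBLoop families idx fuel (pvBBody families idx i (st.1, st.2.1, rest))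

def families_overlap_connected_alt (families : List (List Int)) : Bool :=
  if families.length ≤ 1 then true
  else
    let idx := pvIndex families
    let visited := PySem.List.pySetD (List.replicate families.length false) 0 true
    let st := pvBLoop families idx (2 * families.length + 1) (visited, 1, [0])
    st.2.1 == (families.length : Int)

-- ===== PRECONDITION & SPEC =====
def Spec_families_overlap_connected (families : List (List Int)) (out : Bool) : Prop := out = families_overlap_connected_alt families
instance (families : List (List Int)) (out : Bool) : Decidable (Spec_families_overlap_connected families out) := by unfold Spec_families_overlap_connected; infer_instance

-- ===== CLAIM (what is proved, stated in full; the proofs are below) =====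
def Claim_equal_families_overlap_connected : Prop := ∀ (families : List (List Int)), Dom_families_overlap_connected families → Spec_families_overlap_connected families (families_overlap_connected families)

-- ===== LEMMAS AND PROOFS =====

-- the family with index i (total form of families[i])
def pvFam (families : List (List Int)) (i : Nat) : List Int := families.getD i []

-- families i and j share an element (the overlap-graph edge)
def pvE (families : List (List Int)) (i j : Nat) : Prop :=
  ∃ x, x ∈ pvFam families i ∧ x ∈ pvFam families j

def pvStep (families : List (List Int)) (i j : Nat) : Prop :=
  j < families.length ∧ pvE families i j

-- j is reachable from family 0 in the overlap graph
def pvR (families : List (List Int)) (j : Nat) : Prop :=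
  Relation.ReflTransGen (pvStep families) 0 j

-- ---- small list helpers ----
theorem pvGetD_set {l : List Bool} {k : Nat} (m : Nat) (v : Bool) (h : k < l.length) :
    (l.set k v).getD m false = if m = k then v else l.getD m false := by
  rw [List.getD_eq_getElem?_getD, List.getD_eq_getElem?_getD, List.getElem?_set]
  by_cases hm : m = k
  · simp [hm, h]
  · rw [if_neg hm, if_neg (fun hh => hm hh.symm)]

theorem pvCount_set_true {l : List Bool} {k : Nat} (h : k < l.length)
    (hf : l.getD k false = false) :
    (l.set k true).count true = l.count true + 1 := by
  induction l generalizing k with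
  | nil => simp at h
  | cons a t ih =>
    cases k with
    | zero =>
      simp only [List.getD_cons_zero] at hf
      subst hf
      simp
    | succ k =>
      simp only [List.getD_cons_succ] at hf
      simp only [List.set_cons_succ, List.count_cons, ih (by simpa using h) hf]
      omega

theorem pvMemEnumerate (xs : List (List Int)) (s : Int) (p : Int × List Int) :
    p ∈ PySem.List.enumerate xs s ↔
      ∃ k : Nat, k < xs.length ∧ p.1 = s + (k : Int) ∧ p.2 = xs.getD k [] := by
  induction xs generalizing s with
  | nil => simp [PySem.List.enumerate]
  | cons x xs ih =>
    rw [PySem.List.enumerate_cons]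
    simp only [List.mem_cons, ih]
    constructor
    · rintro (rfl | ⟨k, hk, h1, h2⟩)
      · exact ⟨0, by simp, by simp, by simp⟩
      · exact ⟨k+1, by simpa using hk, by push_cast [h1]; ring, by simpa using h2⟩
    · rintro ⟨k, hk, h1, h2⟩
      cases k with
      | zero =>
        left
        have : p.1 = s := by simpa using h1
        have h2' : p.2 = x := by simpa using h2
        exact Prod.ext this h2'
      | succ k =>
        right
        refine ⟨k, by simpa using hk, by push_cast at h1 ⊢; omega, by simpa using h2⟩

theorem pvIndex_getD (families : List (List Int)) (e j : Int) :
    j ∈ (pvIndex families).getD e [] ↔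
      0 ≤ j ∧ j < (families.length : Int) ∧ e ∈ pvFam families j.toNat := by
  have hflat : pvIndex families =
      ((PySem.List.enumerate families 0).flatMap (fun p => p.2.map (fun e => (e, p.1)))).foldl
        (fun d p => d.modify p.1 [] (fun b => b ++ [p.2])) PySem.Dict.empty := by
    rw [List.foldl_flatMap]
    simp [pvIndex, List.foldl_map]
  rw [hflat, PySem.Dict.getD_foldl_modify_append]
  simp only [PySem.Dict.getD_empty, List.nil_append, List.mem_map, List.mem_filter,
    List.mem_flatMap, pvMemEnumerate]
  constructor
  · rintro ⟨a, ⟨⟨q, ⟨k, hk, hq1, hq2⟩, x, hxq, hxa⟩, heq⟩, haj⟩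
    subst hxa
    simp only [beq_iff_eq] at heq
    simp only at heq haj
    subst heq haj
    rw [hq2] at hxq
    rw [hq1]
    have hT : (0 + (k:Int)).toNat = k := by omega
    refine ⟨by omega, by omega, ?_⟩
    simpa [pvFam, hT] using hxq
  · rintro ⟨h0, hn, he⟩
    refine ⟨(e, j), ⟨⟨(j, families.getD j.toNat []), ⟨j.toNat, by omega, by simp; omega, rfl⟩,
      e, by simpa [pvFam] using he, rfl⟩, by simp⟩, rfl⟩

-- ---- A side ----
def pvAPred (famSets : List (PySem.Set Int)) (i : Int) (seen : PySem.Set Int) (j : Int) : Bool :=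
  !PySem.Set.contains seen j &&
    !(PySem.Set.inter (PySem.List.pyGetD famSets i []) (PySem.List.pyGetD famSets j [])).isEmpty

theorem pvAInner_eq (famSets : List (PySem.Set Int)) (i : Int) :
    ∀ js : List Int, js.Nodup → ∀ (stack : List Int) (seen : PySem.Set Int),
    pvAInner famSets i js stack seen =
      (stack ++ js.filter (pvAPred famSets i seen), seen ++ js.filter (pvAPred famSets i seen)) := by
  intro js
  induction js with
  | nil => intro _ stack seen; simp [pvAInner]
  | cons j t ih =>
    intro hnd stack seen
    have hj : j ∉ t := (List.nodup_cons.mp hnd).1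
    have hndt := (List.nodup_cons.mp hnd).2
    by_cases hc : PySem.Set.contains seen j = true
    · have hp : pvAPred famSets i seen j = false := by unfold pvAPred; rw [hc]; rfl
      have hrec := ih hndt stack seen
      simp only [pvAInner] at hrec ⊢
      simp only [List.foldl_cons, hc, if_true, List.filter_cons, hp, Bool.false_eq_true, if_false]
      exact hrec
    · rw [Bool.not_eq_true] at hc
      by_cases hemp : (PySem.Set.inter (PySem.List.pyGetD famSets i [])
          (PySem.List.pyGetD famSets j [])).isEmpty = true
      · have hp : pvAPred famSets i seen j = false := by unfold pvAPred; rw [hemp]; simp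
        have hrec := ih hndt stack seen
        simp only [pvAInner] at hrec ⊢
        simp only [List.foldl_cons, hc, Bool.false_eq_true, if_false, hemp, if_true,
          List.filter_cons, hp]
        exact hrec
      · rw [Bool.not_eq_true] at hemp
        have hp : pvAPred famSets i seen j = true := by unfold pvAPred; rw [hc, hemp]; rfl
        have hjm : j ∉ seen := fun hm => by
          rw [(PySem.Set.contains_iff seen j).mpr hm] at hc; cases hc
        have hadd : PySem.Set.add seen j = seen ++ [j] := PySem.Set.add_of_not_mem hjm
        have hcong : t.filter (pvAPred famSets i (seen ++ [j])) = t.filter (pvAPred famSets i seen) := by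
          refine List.filter_congr (fun x hx => ?_)
          have hxj : x ≠ j := fun h => hj (h ▸ hx)
          have hcx : PySem.Set.contains (seen ++ [j]) x = PySem.Set.contains seen x := by
            rw [Bool.eq_iff_iff, PySem.Set.contains_iff, PySem.Set.contains_iff]
            simp [List.mem_append, hxj]
          unfold pvAPred; rw [hcx]
        have hrec := ih hndt (stack ++ [j]) (seen ++ [j])
        simp only [pvAInner] at hrec ⊢
        simp only [List.foldl_cons, hc, Bool.false_eq_true, if_false, hemp, hadd,
          List.filter_cons, hp, if_true]
        rw [hrec, hcong]
        simp

def pvAInv (families : List (List Int)) (stack seen : List Int) : Prop :=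
  seen.Nodup ∧
  (∀ j ∈ seen, 0 ≤ j ∧ j < (families.length : Int) ∧ pvR families j.toNat) ∧
  (∀ j ∈ stack, j ∈ seen) ∧
  (∀ i ∈ seen, i ∉ stack →
    ∀ j : Nat, j < families.length → pvE families i.toNat j → (j : Int) ∈ seen)

theorem pvFamSets_getD (families : List (List Int)) {a : Int} (h0 : 0 ≤ a)
    (h1 : a.toNat < families.length) :
    PySem.List.pyGetD (families.map (fun f => PySem.Set.ofList f)) a [] =
      PySem.Set.ofList (pvFam families a.toNat) := by
  rw [PySem.List.pyGetD_eq_getElem _ _ h0 (by simp; omega)]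
  simp [pvFam, List.getD_eq_getElem?_getD, List.getElem?_eq_getElem h1]

theorem pvAPred_iff (families : List (List Int)) (seen : PySem.Set Int) {i j : Int}
    (hi0 : 0 ≤ i) (hi : i.toNat < families.length) (hj0 : 0 ≤ j) (hj : j.toNat < families.length) :
    pvAPred (families.map (fun f => PySem.Set.ofList f)) i seen j = true ↔
      j ∉ seen ∧ pvE families i.toNat j.toNat := by
  unfold pvAPred
  rw [pvFamSets_getD _ hi0 hi, pvFamSets_getD _ hj0 hj]
  rw [Bool.and_eq_true, Bool.not_eq_true', Bool.not_eq_true']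
  have h1 : (PySem.Set.contains seen j = false) ↔ j ∉ seen := by
    rw [← Bool.not_eq_true, not_congr (PySem.Set.contains_iff seen j)]
  have h2 : ((PySem.Set.inter (PySem.Set.ofList (pvFam families i.toNat))
      (PySem.Set.ofList (pvFam families j.toNat))).isEmpty = false) ↔
      pvE families i.toNat j.toNat := by
    rw [List.isEmpty_eq_false_iff_exists_mem]
    simp [PySem.Set.mem_inter, PySem.Set.mem_ofList, pvE]
  rw [h1, h2]

theorem pvALoop_post (families : List (List Int)) :
    ∀ (fuel : Nat) (stack seen : List Int), pvAInv families stack seen →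
    stack.length + 2 * (families.length - seen.length) ≤ fuel →
    pvAInv families []
        (pvALoop (families.map (fun f => PySem.Set.ofList f)) fuel stack seen) ∧
      seen ⊆ pvALoop (families.map (fun f => PySem.Set.ofList f)) fuel stack seen := by
  intro fuel
  induction fuel with
  | zero =>
    intro stack seen hinv hm
    have hs : stack = [] := List.eq_nil_of_length_eq_zero (by omega)
    subst hs
    exact ⟨hinv, fun x hx => hx⟩
  | succ fuel ih =>
    intro stack seen hinv hm
    obtain ⟨hnd, hbnd, hss, hcl⟩ := hinv
    rcases List.eq_nil_or_concat stack with rfl | ⟨ys, i, rfl⟩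
    · have hres : pvALoop (families.map (fun f => PySem.Set.ofList f)) (fuel+1) [] seen = seen := by
        simp [pvALoop, PySem.List.pop?]
      rw [hres]
      exact ⟨⟨hnd, hbnd, by simp, fun i hi _ => hcl i hi (by simp)⟩, fun x hx => hx⟩
    · simp only [List.concat_eq_append] at hss hcl ⊢
      have hstep : pvALoop (families.map (fun f => PySem.Set.ofList f)) (fuel+1) (ys ++ [i]) seen =
        pvALoop (families.map (fun f => PySem.Set.ofList f)) fuel
          (pvAInner (families.map (fun f => PySem.Set.ofList f)) i
            (PySem.List.pyRange 0 (((families.map (fun f => PySem.Set.ofList f)).length : Int)) 1) ys seen).1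
          (pvAInner (families.map (fun f => PySem.Set.ofList f)) i
            (PySem.List.pyRange 0 (((families.map (fun f => PySem.Set.ofList f)).length : Int)) 1) ys seen).2 := by
        simp only [pvALoop, PySem.List.pop?_last]
      have hlenmap : ((families.map (fun f => PySem.Set.ofList f)).length : Int) = (families.length : Int) := by
        simp
      rw [hlenmap] at hstep
      rw [hstep, pvAInner_eq _ _ _ (PySem.List.nodup_pyRange_one _ _) ys seen]
      set n := families.length with hn
      set js := PySem.List.pyRange 0 (n : Int) 1 with hjs
      set new := js.filter (pvAPred (families.map (fun f => PySem.Set.ofList f)) i seen) with hnew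
      have hiseen : i ∈ seen := hss i (by simp)
      obtain ⟨hi0, hin, hiR⟩ := hbnd i hiseen
      have hinat : i.toNat < n := by omega
      have hmemjs : ∀ x, x ∈ js ↔ 0 ≤ x ∧ x < (n : Int) := by
        intro x; rw [hjs, PySem.List.mem_pyRange_one]
      have hnewfact : ∀ x ∈ new, (0 ≤ x ∧ x.toNat < n) ∧ x ∉ seen ∧ pvE families i.toNat x.toNat := by
        intro x hx
        rw [hnew, List.mem_filter] at hx
        have hb := (hmemjs x).mp hx.1
        have hx0 : 0 ≤ x := hb.1
        have hxn : x.toNat < n := by omega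
        exact ⟨⟨hx0, hxn⟩, (pvAPred_iff families seen hi0 hinat hx0 hxn).mp hx.2⟩
      have hnodupnew : new.Nodup := List.Nodup.filter _ (PySem.List.nodup_pyRange_one _ _)
      have hnd' : (seen ++ new).Nodup := by
        rw [List.nodup_append]
        refine ⟨hnd, hnodupnew, ?_⟩
        intro a ha b hb hab
        exact ((hnewfact b hb).2.1) (hab ▸ ha)
      have hbnd' : ∀ j ∈ seen ++ new, 0 ≤ j ∧ j < (n : Int) ∧ pvR families j.toNat := by
        intro j hjm
        rcases List.mem_append.mp hjm with h | h
        · exact hbnd j h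
        · obtain ⟨⟨h0, h1⟩, _, hE⟩ := hnewfact j h
          exact ⟨h0, by omega, Relation.ReflTransGen.tail hiR ⟨h1, hE⟩⟩
      have hss' : ∀ j ∈ ys ++ new, j ∈ seen ++ new := by
        intro j hjm
        rcases List.mem_append.mp hjm with h | h
        · exact List.mem_append_left _ (hss j (by simp [h]))
        · exact List.mem_append_right _ h
      have hcl' : ∀ i' ∈ seen ++ new, i' ∉ ys ++ new →
          ∀ j : Nat, j < n → pvE families i'.toNat j → (j : Int) ∈ seen ++ new := by
        intro i' hi'm hi'ns j hjn hE
        rcases List.mem_append.mp hi'm with hi'seen | hi'new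
        · by_cases hii : i' = i
          · subst hii
            by_cases hjseen : (j : Int) ∈ seen
            · exact List.mem_append_left _ hjseen
            · refine List.mem_append_right _ ?_
              rw [hnew, List.mem_filter]
              refine ⟨(hmemjs _).mpr ⟨by omega, by omega⟩, ?_⟩
              rw [pvAPred_iff families seen hi0 hinat (by omega) (by simpa using hjn)]
              exact ⟨hjseen, by simpa using hE⟩
          · have hnotold : i' ∉ ys ++ [i] := by
              intro hmem
              rcases List.mem_append.mp hmem with h | h
              · exact hi'ns (List.mem_append_left _ h)
              · exact hii (by simpa using h)
            exact List.mem_append_left _ (hcl i' hi'seen hnotold j hjn hE)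
        · exact absurd (List.mem_append_right ys hi'new) hi'ns
      have hsub_js : seen ++ new ⊆ js := by
        intro x hx
        rcases List.mem_append.mp hx with h | h
        · obtain ⟨h0, h1, _⟩ := hbnd x h
          exact (hmemjs x).mpr ⟨h0, h1⟩
        · rw [hnew, List.mem_filter] at h; exact h.1
      have hlen_le : seen.length + new.length ≤ n := by
        have h1 := (List.Nodup.subperm hnd' hsub_js).length_le
        simp only [List.length_append] at h1
        rw [hjs, PySem.List.length_pyRange_one] at h1
        omega
      have hm' : ys.length + new.length + 2 * (n - (seen.length + new.length)) ≤ fuel := by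
        simp only [List.concat_eq_append, List.length_append, List.length_cons] at hm
        have hsl : seen.length ≤ n := by omega
        omega
      have := ih (ys ++ new) (seen ++ new) ⟨hnd', hbnd', hss', hcl'⟩
        (by rw [List.length_append, List.length_append]; exact hm')
      exact ⟨this.1, fun x hx => this.2 (List.mem_append_left _ hx)⟩

theorem pvA_char (families : List (List Int)) (h2 : 2 ≤ families.length) :
    (families_overlap_connected families = true ↔
      ∀ j : Nat, j < families.length → pvR families j) := by
  unfold families_overlap_connected
  rw [if_neg (by omega)]
  set n := families.length with hn
  set out := pvALoop (families.map (fun f => PySem.Set.ofList f)) (2 * n + 1) [0] [0] with hout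
  have hinv0 : pvAInv families [0] [0] := by
    refine ⟨by simp, ?_, by simp, ?_⟩
    · intro j hj
      simp only [List.mem_singleton] at hj
      subst hj
      exact ⟨le_refl 0, by omega, Relation.ReflTransGen.refl⟩
    · intro i hi hni
      simp only [List.mem_singleton] at hi
      exact absurd (hi ▸ List.mem_singleton_self _) hni
  obtain ⟨⟨hnd, hbnd, _, hcl⟩, hsub⟩ :=
    pvALoop_post families (2 * n + 1) [0] [0] hinv0 (by simp; omega)
  rw [← hout] at hnd hbnd hcl hsub
  have h0out : (0 : Int) ∈ out := hsub (List.mem_singleton_self _)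
  have hRin : ∀ k : Nat, pvR families k → (k : Int) ∈ out := by
    intro k hk
    induction hk with
    | refl => exact h0out
    | tail hab hbc ihh =>
      rename_i b c
      have := hcl (b : Int) ihh (by simp) c hbc.1 (by simpa using hbc.2)
      exact this
  have hmemjs : ∀ x : Int, x ∈ PySem.List.pyRange 0 (n : Int) 1 ↔ 0 ≤ x ∧ x < (n : Int) :=
    fun x => PySem.List.mem_pyRange_one
  have hsubjs : out ⊆ PySem.List.pyRange 0 (n : Int) 1 := by
    intro x hx
    exact (hmemjs x).mpr ⟨(hbnd x hx).1, (hbnd x hx).2.1⟩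
  have hjslen : (PySem.List.pyRange 0 (n : Int) 1).length = n := by
    rw [PySem.List.length_pyRange_one]; omega
  rw [beq_iff_eq]
  have hlen_eq : PySem.Set.len out = (out.length : Int) := rfl
  constructor
  · intro hlen j hj
    have hperm : out.Perm (PySem.List.pyRange 0 (n : Int) 1) := by
      refine (List.Nodup.subperm hnd hsubjs).perm_of_length_le ?_
      rw [hjslen]
      rw [hlen_eq] at hlen
      simp only [List.length_map] at hlen
      omega
    have hjo : (j : Int) ∈ out := hperm.mem_iff.mpr ((hmemjs _).mpr ⟨by omega, by omega⟩)
    have := (hbnd _ hjo).2.2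
    simpa using this
  · intro hall
    have hsub2 : PySem.List.pyRange 0 (n : Int) 1 ⊆ out := by
      intro x hx
      have hb := (hmemjs x).mp hx
      have := hRin x.toNat (hall x.toNat (by omega))
      rwa [Int.toNat_of_nonneg hb.1] at this
    have hperm : out.Perm (PySem.List.pyRange 0 (n : Int) 1) :=
      (List.perm_ext_iff_of_nodup hnd (PySem.List.nodup_pyRange_one _ _)).mpr
        (fun a => ⟨fun h => hsubjs h, fun h => hsub2 h⟩)
    rw [hlen_eq, hperm.length_eq, hjslen]
    simp
    exact hn

-- ---- B side ----
def pvBInv (families : List (List Int)) (st : List Bool × Int × List Int) : Prop :=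
  st.1.length = families.length ∧
  st.2.1 = (st.1.count true : Int) ∧
  st.1.getD 0 false = true ∧
  (∀ k : Nat, k < families.length → st.1.getD k false = true → pvR families k) ∧
  (∀ j ∈ st.2.2, 0 ≤ j ∧ j < (families.length : Int) ∧ st.1.getD j.toNat false = true) ∧
  (∀ i : Nat, i < families.length → st.1.getD i false = true → (i : Int) ∉ st.2.2 →
    ∀ j : Nat, j < families.length → pvE families i j → st.1.getD j false = true)

theorem pvVisGet (vis : List Bool) {j : Int} (h0 : 0 ≤ j) (h1 : j.toNat < vis.length) :
    PySem.List.pyGetD vis j false = vis.getD j.toNat false := by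
  rw [PySem.List.pyGetD_eq_getElem vis false h0 (by omega)]
  rw [List.getD_eq_getElem?_getD, List.getElem?_eq_getElem h1]
  rfl

theorem pvMark_post (families : List (List Int)) (b : List Int)
    (hb : ∀ j ∈ b, 0 ≤ j ∧ j < (families.length : Int) ∧ pvR families j.toNat) :
    ∀ (vis : List Bool) (cnt : Int) (stk : List Int),
    vis.length = families.length → cnt = (vis.count true : Int) →
    (let s' := b.foldl (fun st j =>
        if PySem.List.pyGetD st.1 j false then st
        else (PySem.List.pySetD st.1 j true, st.2.1 + 1, st.2.2 ++ [j])) (vis, cnt, stk)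
     s'.1.length = families.length ∧ s'.2.1 = (s'.1.count true : Int) ∧
     (∀ j ∈ b, s'.1.getD j.toNat false = true) ∧
     ∃ new : List Int, s'.2.2 = stk ++ new ∧ s'.2.1 = cnt + (new.length : Int) ∧
       (∀ x ∈ new, 0 ≤ x ∧ x < (families.length : Int) ∧ pvR families x.toNat) ∧
       (∀ k : Nat, k < families.length →
         (s'.1.getD k false = true ↔ vis.getD k false = true ∨ (k : Int) ∈ new))) := by
  induction b with
  | nil =>
    intro vis cnt stk hlen hcnt
    exact ⟨hlen, by simpa using hcnt, by simp, [], by simp, by simp, by simp, fun k hk => by simp⟩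
  | cons j t ih =>
    intro vis cnt stk hlen hcnt
    obtain ⟨hj0, hjn, hjR⟩ := hb j List.mem_cons_self
    have hjnat : j.toNat < vis.length := by omega
    have hget : PySem.List.pyGetD vis j false = vis.getD j.toNat false := pvVisGet vis hj0 hjnat
    simp only [List.foldl_cons]
    by_cases hv : vis.getD j.toNat false = true
    · rw [if_pos (by rw [hget, hv])]
      obtain ⟨p1, p2, p4, new2, hstk2, hcnt2, hnewf2, hiff2⟩ :=
        ih (fun x hx => hb x (List.mem_cons_of_mem _ hx)) vis cnt stk hlen hcnt
      refine ⟨p1, p2, ?_, new2, hstk2, hcnt2, hnewf2, hiff2⟩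
      intro x hx
      rcases List.mem_cons.mp hx with rfl | hx
      · exact (hiff2 x.toNat (by omega)).mpr (Or.inl hv)
      · exact p4 x hx
    · have hv' : vis.getD j.toNat false = false := by
        cases h : vis.getD j.toNat false
        · rfl
        · exact absurd h hv
      rw [if_neg (by rw [hget, hv']; exact Bool.false_ne_true)]
      have hset : PySem.List.pySetD vis j true = vis.set j.toNat true :=
        PySem.List.pySetD_of_nonneg vis true hj0
      rw [hset]
      have hlen2 : (vis.set j.toNat true).length = families.length := by
        rw [List.length_set]; exact hlen
      have hcnt2 : cnt + 1 = ((vis.set j.toNat true).count true : Int) := by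
        rw [pvCount_set_true hjnat hv']
        push_cast
        omega
      obtain ⟨p1, p2, p4, new2, hstk2, hcnt2', hnewf2, hiff2⟩ :=
        ih (fun x hx => hb x (List.mem_cons_of_mem _ hx))
          (vis.set j.toNat true) (cnt + 1) (stk ++ [j]) hlen2 hcnt2
      have hvis2get : ∀ m : Nat, (vis.set j.toNat true).getD m false =
          if m = j.toNat then true else vis.getD m false :=
        fun m => pvGetD_set m true hjnat
      refine ⟨p1, p2, ?_, j :: new2, by rw [hstk2]; simp, ?_, ?_, ?_⟩
      · intro x hx
        rcases List.mem_cons.mp hx with rfl | hx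
        · refine (hiff2 x.toNat (by omega)).mpr (Or.inl ?_)
          rw [hvis2get, if_pos rfl]
        · exact p4 x hx
      · rw [hcnt2', List.length_cons]
        push_cast
        ring
      · intro x hx
        rcases List.mem_cons.mp hx with rfl | hx
        · exact ⟨hj0, hjn, hjR⟩
        · exact hnewf2 x hx
      · intro k hk
        rw [hiff2 k hk, hvis2get k]
        by_cases hkj : k = j.toNat
        · have hcast : (k : Int) = j := by omega
          rw [if_pos hkj]
          simp [hcast]
        · have hcast : (k : Int) ≠ j := by omega
          rw [if_neg hkj]
          simp only [List.mem_cons]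
          tauto

theorem pvFoldE_post (families : List (List Int)) :
    ∀ (es : List Int),
    (∀ e ∈ es, ∀ j ∈ (pvIndex families).getD e [],
      0 ≤ j ∧ j < (families.length : Int) ∧ pvR families j.toNat) →
    ∀ (vis : List Bool) (cnt : Int) (stk : List Int),
    vis.length = families.length → cnt = (vis.count true : Int) →
    (let s' := es.foldl (fun st e =>
        ((pvIndex families).getD e []).foldl (fun st j =>
          if PySem.List.pyGetD st.1 j false then st
          else (PySem.List.pySetD st.1 j true, st.2.1 + 1, st.2.2 ++ [j])) st) (vis, cnt, stk)
     s'.1.length = families.length ∧ s'.2.1 = (s'.1.count true : Int) ∧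
     (∀ e ∈ es, ∀ j ∈ (pvIndex families).getD e [], s'.1.getD j.toNat false = true) ∧
     ∃ new : List Int, s'.2.2 = stk ++ new ∧ s'.2.1 = cnt + (new.length : Int) ∧
       (∀ x ∈ new, 0 ≤ x ∧ x < (families.length : Int) ∧ pvR families x.toNat) ∧
       (∀ k : Nat, k < families.length →
         (s'.1.getD k false = true ↔ vis.getD k false = true ∨ (k : Int) ∈ new))) := by
  intro es
  induction es with
  | nil =>
    intro _ vis cnt stk hlen hcnt
    exact ⟨hlen, by simpa using hcnt, by simp, [], by simp, by simp, by simp, fun k hk => by simp⟩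
  | cons e t ih =>
    intro hb vis cnt stk hlen hcnt
    simp only [List.foldl_cons]
    obtain ⟨p1, p2, p4, new1, hstk1, hcnt1, hnf1, hiff1⟩ :=
      pvMark_post families ((pvIndex families).getD e []) (hb e List.mem_cons_self)
        vis cnt stk hlen hcnt
    set s1 := ((pvIndex families).getD e []).foldl (fun st j =>
        if PySem.List.pyGetD st.1 j false then st
        else (PySem.List.pySetD st.1 j true, st.2.1 + 1, st.2.2 ++ [j])) (vis, cnt, stk) with hs1
    obtain ⟨q1, q2, q4, new2, hstk2, hcnt2, hnf2, hiff2⟩ :=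
      ih (fun x hx => hb x (List.mem_cons_of_mem _ hx)) s1.1 s1.2.1 s1.2.2 p1 p2
    have heta : (s1.1, s1.2.1, s1.2.2) = s1 := rfl
    rw [heta] at q1 q2 q4 hstk2 hcnt2 hiff2
    refine ⟨q1, q2, ?_, new1 ++ new2, ?_, ?_, ?_, ?_⟩
    · intro x hx j hj
      rcases List.mem_cons.mp hx with rfl | hx
      · have := p4 j hj
        have hjb := (hb x List.mem_cons_self) j hj
        exact (hiff2 j.toNat (by omega)).mpr (Or.inl this)
      · exact q4 x hx j hj
    · rw [hstk2, hstk1, List.append_assoc]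
    · rw [hcnt2, hcnt1, List.length_append]
      push_cast
      ring
    · intro x hx
      rcases List.mem_append.mp hx with hx | hx
      · exact hnf1 x hx
      · exact hnf2 x hx
    · intro k hk
      rw [hiff2 k hk, hiff1 k hk, List.mem_append]
      tauto

theorem pvBody_post (families : List (List Int)) (i : Int)
    (hi0 : 0 ≤ i) (hin : i < (families.length : Int)) (hiR : pvR families i.toNat)
    (vis : List Bool) (cnt : Int) (stk : List Int)
    (hlen : vis.length = families.length) (hcnt : cnt = (vis.count true : Int)) :
    (let s' := pvBBody families (pvIndex families) i (vis, cnt, stk)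
     s'.1.length = families.length ∧ s'.2.1 = (s'.1.count true : Int) ∧
     (∀ e ∈ pvFam families i.toNat, ∀ j ∈ (pvIndex families).getD e [],
        s'.1.getD j.toNat false = true) ∧
     ∃ new : List Int, s'.2.2 = stk ++ new ∧ s'.2.1 = cnt + (new.length : Int) ∧
       (∀ x ∈ new, 0 ≤ x ∧ x < (families.length : Int) ∧ pvR families x.toNat) ∧
       (∀ k : Nat, k < families.length →
         (s'.1.getD k false = true ↔ vis.getD k false = true ∨ (k : Int) ∈ new))) := by
  have hes : PySem.List.pyGetD families i [] = pvFam families i.toNat := by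
    rw [PySem.List.pyGetD_eq_getElem families [] hi0 hin]
    rw [pvFam, List.getD_eq_getElem?_getD, List.getElem?_eq_getElem (by omega)]
    rfl
  have hb : ∀ e ∈ pvFam families i.toNat, ∀ j ∈ (pvIndex families).getD e [],
      0 ≤ j ∧ j < (families.length : Int) ∧ pvR families j.toNat := by
    intro e he j hj
    obtain ⟨hj0, hjn, hjf⟩ := (pvIndex_getD families e j).mp hj
    refine ⟨hj0, hjn, Relation.ReflTransGen.tail hiR ⟨by omega, e, he, hjf⟩⟩
  have := pvFoldE_post families (pvFam families i.toNat) hb vis cnt stk hlen hcnt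
  unfold pvBBody
  rw [hes]
  exact this

theorem pvBLoop_post (families : List (List Int)) :
    ∀ (fuel : Nat) (st : List Bool × Int × List Int), pvBInv families st →
    st.2.2.length + 2 * (families.length - st.1.count true) ≤ fuel →
    (let out := pvBLoop families (pvIndex families) fuel st
     pvBInv families out ∧ out.2.2 = []) := by
  intro fuel
  induction fuel with
  | zero =>
    intro st hinv hm
    have h2 : st.2.2 = [] := List.eq_nil_of_length_eq_zero (by omega)
    exact ⟨hinv, h2⟩
  | succ fuel ih =>
    intro st hinv hm
    obtain ⟨vis, cnt, stack⟩ := st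
    obtain ⟨hlen, hcnt, h0v, hvR, hstk, hcl⟩ := hinv
    dsimp only at hlen hcnt h0v hvR hstk hcl hm
    rcases List.eq_nil_or_concat stack with rfl | ⟨ys, i, rfl⟩
    · have hres : pvBLoop families (pvIndex families) (fuel+1) (vis, cnt, []) = (vis, cnt, []) := by
        simp [pvBLoop, PySem.List.pop?]
      rw [hres]
      exact ⟨⟨hlen, hcnt, h0v, hvR, hstk, hcl⟩, rfl⟩
    · simp only [List.concat_eq_append] at hstk hcl hm ⊢
      have hstep : pvBLoop families (pvIndex families) (fuel+1) (vis, cnt, ys ++ [i]) =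
          pvBLoop families (pvIndex families) fuel
            (pvBBody families (pvIndex families) i (vis, cnt, ys)) := by
        simp only [pvBLoop, PySem.List.pop?_last]
      rw [hstep]
      obtain ⟨hi0, hin, hivis⟩ := hstk i (by simp)
      have hiR : pvR families i.toNat := hvR i.toNat (by omega) hivis
      obtain ⟨p1, p2, p4, new, hstk', hcnt', hnf, hiff⟩ :=
        pvBody_post families i hi0 hin hiR vis cnt ys hlen hcnt
      set s' := pvBBody families (pvIndex families) i (vis, cnt, ys) with hs'
      have hn0 : 0 < families.length := by
        by_contra h
        have hv0 : vis = [] := List.eq_nil_of_length_eq_zero (by omega)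
        rw [hv0] at h0v
        simp at h0v
      have h0v' : s'.1.getD 0 false = true := (hiff 0 hn0).mpr (Or.inl h0v)
      have hvR' : ∀ k : Nat, k < families.length → s'.1.getD k false = true → pvR families k := by
        intro k hk hvk
        rcases (hiff k hk).mp hvk with hold | hnew
        · exact hvR k hk hold
        · have := (hnf _ hnew).2.2
          simpa using this
      have hstk2 : ∀ j ∈ s'.2.2, 0 ≤ j ∧ j < (families.length : Int) ∧ s'.1.getD j.toNat false = true := by
        intro j hj
        rw [hstk'] at hj
        rcases List.mem_append.mp hj with hj | hj
        · obtain ⟨h0, h1, h2⟩ := hstk j (List.mem_append_left _ hj)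
          exact ⟨h0, h1, (hiff j.toNat (by omega)).mpr (Or.inl h2)⟩
        · obtain ⟨h0, h1, _⟩ := hnf j hj
          refine ⟨h0, h1, (hiff j.toNat (by omega)).mpr (Or.inr ?_)⟩
          rwa [Int.toNat_of_nonneg h0]
      have hcl' : ∀ i' : Nat, i' < families.length → s'.1.getD i' false = true →
          (i' : Int) ∉ s'.2.2 → ∀ j : Nat, j < families.length → pvE families i' j →
          s'.1.getD j false = true := by
        intro i' hi'n hi'vis hi'ns j hjn hE
        rcases (hiff i' hi'n).mp hi'vis with hold | hnew
        · by_cases hii : (i' : Int) = i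
          · obtain ⟨x, hx1, hx2⟩ := hE
            have hxb : (j : Int) ∈ (pvIndex families).getD x [] :=
              (pvIndex_getD families x j).mpr ⟨by omega, by omega, by simpa using hx2⟩
            have hit : i.toNat = i' := by omega
            have := p4 x (by rw [hit]; exact hx1) (j : Int) hxb
            simpa using this
          · have hnotold : (i' : Int) ∉ ys ++ [i] := by
              intro hmem
              rcases List.mem_append.mp hmem with h | h
              · exact hi'ns (by rw [hstk']; exact List.mem_append_left _ h)
              · exact hii (by simpa using h)
            exact (hiff j hjn).mpr (Or.inl (hcl i' hi'n hold hnotold j hjn hE))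
        · exact absurd (by rw [hstk']; exact List.mem_append_right _ hnew) hi'ns
      have hcount' : s'.1.count true = vis.count true + new.length := by
        have h1 : (s'.1.count true : Int) = (vis.count true : Int) + (new.length : Int) := by
          rw [← p2, hcnt', hcnt]
        omega
      have hcle : s'.1.count true ≤ families.length := p1 ▸ List.count_le_length
      have hm' : s'.2.2.length + 2 * (families.length - s'.1.count true) ≤ fuel := by
        rw [hstk', List.length_append]
        simp only [List.length_append, List.length_cons] at hm
        omega
      exact ih s' ⟨p1, p2, h0v', hvR', hstk2, hcl'⟩ hm'

theorem pvB_char (families : List (List Int)) (h2 : 2 ≤ families.length) :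
    (families_overlap_connected_alt families = true ↔
      ∀ j : Nat, j < families.length → pvR families j) := by
  unfold families_overlap_connected_alt
  rw [if_neg (by omega)]
  set n := families.length with hn
  have hvis0 : PySem.List.pySetD (List.replicate n false) 0 true =
      (List.replicate n false).set 0 true := by
    rw [PySem.List.pySetD_of_nonneg _ _ (by norm_num)]
    rfl
  rw [hvis0]
  set vis0 := (List.replicate n false).set 0 true with hv0
  have hlen0 : vis0.length = n := by simp [hv0]
  have hg0 : ∀ k : Nat, k < n → vis0.getD k false = if k = 0 then true else false := by
    intro k hk
    rw [hv0, pvGetD_set k true (by simp; omega)]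
    by_cases hk0 : k = 0
    · simp [hk0]
    · rw [if_neg hk0, if_neg hk0]
      rw [List.getD_eq_getElem?_getD, List.getElem?_replicate]
      simp [hk]
  have hcnt0 : (1 : Int) = (vis0.count true : Int) := by
    rw [hv0, pvCount_set_true (by simp; omega) (by
      rw [List.getD_eq_getElem?_getD, List.getElem?_replicate]
      simp [show 0 < n by omega])]
    rw [List.count_replicate]
    norm_num
  have hinv0 : pvBInv families (vis0, 1, [0]) := by
    refine ⟨hlen0, hcnt0, ?_, ?_, ?_, ?_⟩
    · rw [hg0 0 (by omega)]; rfl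
    · intro k hk hvk
      rw [hg0 k hk] at hvk
      by_cases hk0 : k = 0
      · subst hk0; exact Relation.ReflTransGen.refl
      · rw [if_neg hk0] at hvk; cases hvk
    · intro j hj
      simp only [List.mem_singleton] at hj
      subst hj
      refine ⟨le_refl 0, by omega, ?_⟩
      rw [show ((0:Int).toNat) = 0 from rfl, hg0 0 (by omega)]
      rfl
    · intro i hi hvi hni
      rw [hg0 i hi] at hvi
      by_cases hi0 : i = 0
      · subst hi0; exact absurd (List.mem_singleton_self _) hni
      · rw [if_neg hi0] at hvi; cases hvi
  have hc1 : vis0.count true = 1 := by omega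
  obtain ⟨⟨hlen, hcnt, h0v, hvR, hstk, hcl⟩, hempty⟩ :=
    pvBLoop_post families (2 * n + 1) (vis0, 1, [0]) hinv0 (by
      dsimp only
      rw [hc1]
      simp only [List.length_singleton]
      omega)
  set out := pvBLoop families (pvIndex families) (2 * n + 1) (vis0, 1, [0]) with hout
  rw [beq_iff_eq]
  have hRv : ∀ k : Nat, pvR families k → k < n ∧ out.1.getD k false = true := by
    intro k hk
    induction hk with
    | refl => exact ⟨by omega, h0v⟩
    | tail hab hbc ihh =>
      rename_i b c
      exact ⟨hbc.1, hcl b ihh.1 ihh.2 (by simp [hempty]) c hbc.1 hbc.2⟩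
  constructor
  · intro hc j hj
    rw [hcnt] at hc
    have hcn : out.1.count true = n := by omega
    have hc' : out.1.count true = out.1.length := by rw [hlen, hcn]
    have hall := List.count_eq_length.mp hc'
    apply hvR j hj
    rw [List.getD_eq_getElem?_getD, List.getElem?_eq_getElem (by omega)]
    simp only [Option.getD_some]
    exact (hall _ (List.getElem_mem _)).symm
  · intro hall
    have hv : ∀ b ∈ out.1, true = b := by
      intro b hb
      obtain ⟨k, hk, rfl⟩ := List.mem_iff_getElem.mp hb
      have hkn : k < n := by omega
      have h := (hRv k (hall k hkn)).2
      rw [List.getD_eq_getElem?_getD, List.getElem?_eq_getElem hk] at h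
      simpa using h
    have hc' : out.1.count true = out.1.length := List.count_eq_length.mpr hv
    rw [hcnt, hc', hlen]

-- ===== VERDICT (by name: the statement is the Claim_ definition above) =====
theorem families_overlap_connected_spec : Claim_equal_families_overlap_connected := by
  intro families _
  unfold Spec_families_overlap_connected
  by_cases h : families.length ≤ 1
  · simp [families_overlap_connected, families_overlap_connected_alt, h]
  · rw [Bool.eq_iff_iff, pvA_char families (by omega), pvB_char families (by omega)]
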